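-- pv_equiv track=rewrite | github.com/MrDunn0/BI_2019_Python | Non-unique Elements.py | get_non_unique_els
-- ===== SOURCE A (Python) =====
-- def get_non_unique_els(initial_list):
--     non_unique_list = []
--     for i in initial_list:
--         if i in non_unique_list:      # I think it will speed up function, although only the second condition is enough
--             non_unique_list.append(i)
--         elif initial_list.count(i) > 1:
--             non_unique_list.append(i)
--     return non_unique_list
-- ===== SOURCE B (Python) =====
-- def get_non_unique_els(initial_list):
--     # Two phases: first collect the distinct duplicated values, then emit
--     # all occurrences in original order.
--     dups = []
--     for x in initial_list:
--         if x not in dups and initial_list.count(x) > 1: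
--             dups.append(x)
--     return [x for x in initial_list if x in dups]
-- ===== Notes on version B (the rewrite author's own statement) =====
-- stated objective: alternative
-- what changed: B splits the job into two passes - first build the table of distinct duplicated values, then filter the list by membership in that table - instead of A's single interleaved append loop whose branch depends on the partially built output.
import Mathlib
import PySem

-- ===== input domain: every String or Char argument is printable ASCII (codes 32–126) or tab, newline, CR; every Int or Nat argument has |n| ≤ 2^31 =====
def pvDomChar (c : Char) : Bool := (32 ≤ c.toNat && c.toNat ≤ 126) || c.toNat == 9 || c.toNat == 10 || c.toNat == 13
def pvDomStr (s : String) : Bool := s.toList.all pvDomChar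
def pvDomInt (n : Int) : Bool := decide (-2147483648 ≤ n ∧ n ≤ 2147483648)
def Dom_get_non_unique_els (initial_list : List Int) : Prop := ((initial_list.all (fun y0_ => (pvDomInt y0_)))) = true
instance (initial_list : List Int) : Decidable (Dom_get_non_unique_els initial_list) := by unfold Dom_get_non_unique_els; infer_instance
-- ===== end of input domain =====

-- B builds the table of distinct duplicated values first and then filters the list by it,
-- instead of A's single interleaved append loop (objective: alternative decomposition).

-- ===== PORT A =====
def get_non_unique_els (initial_list : List Int) : List Int :=
  initial_list.foldl
    (fun non_unique_list i =>
      if non_unique_list.contains i then non_unique_list ++ [i]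
      else if PySem.List.count initial_list i > 1 then non_unique_list ++ [i]
      else non_unique_list)
    []

-- ===== PORT B =====
def get_non_unique_els_alt (initial_list : List Int) : List Int :=
  let dups := initial_list.foldl
    (fun dups x =>
      if !dups.contains x && PySem.List.count initial_list x > 1 then dups ++ [x]
      else dups)
    []
  initial_list.filter (fun x => dups.contains x)

-- ===== PRECONDITION & SPEC =====
def Spec_get_non_unique_els (initial_list : List Int) (out : List Int) : Prop := out = get_non_unique_els_alt initial_list
instance (initial_list : List Int) (out : List Int) : Decidable (Spec_get_non_unique_els initial_list out) := by unfold Spec_get_non_unique_els; infer_instance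

-- ===== CLAIM (what is proved, stated in full; the proofs are below) =====
def Claim_equal_get_non_unique_els : Prop := ∀ (initial_list : List Int), Dom_get_non_unique_els initial_list → Spec_get_non_unique_els initial_list (get_non_unique_els initial_list)

-- ===== LEMMAS AND PROOFS =====

-- A's loop: with every element of the accumulator already known duplicated in l,
-- it appends exactly the elements of the remaining list whose count in l exceeds 1.
theorem aLoop_eq_filter (l : List Int) :
    ∀ (l' acc : List Int), (∀ x ∈ acc, PySem.List.count l x > 1) →
    l'.foldl
      (fun non_unique_list i =>
        if non_unique_list.contains i then non_unique_list ++ [i]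
        else if PySem.List.count l i > 1 then non_unique_list ++ [i]
        else non_unique_list)
      acc = acc ++ l'.filter (fun i => decide (PySem.List.count l i > 1)) := by
  intro l'
  induction l' with
  | nil => intro acc _; simp
  | cons i rest ih =>
    intro acc hacc
    rw [List.foldl_cons, List.filter_cons]
    by_cases hc : PySem.List.count l i > 1
    · have hstep : (if acc.contains i then acc ++ [i]
          else if PySem.List.count l i > 1 then acc ++ [i] else acc) = acc ++ [i] := by
        split_ifs <;> simp_all
      rw [hstep, if_pos (by simpa using hc),
          ih (acc ++ [i]) (by
            intro x hx
            rcases List.mem_append.mp hx with h | h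
            · exact hacc x h
            · simp at h; simpa [h] using hc)]
      simp
    · have hmem : i ∉ acc := fun h => hc (hacc i h)
      have hstep : (if acc.contains i then acc ++ [i]
          else if PySem.List.count l i > 1 then acc ++ [i] else acc) = acc := by
        split_ifs <;> simp_all
      rw [hstep, if_neg (by simpa using hc), ih acc hacc]

-- membership in B's dups table after the loop
theorem bDups_mem (l : List Int) :
    ∀ (l' d : List Int) (y : Int),
    y ∈ l'.foldl
      (fun dups x =>
        if !dups.contains x && PySem.List.count l x > 1 then dups ++ [x]
        else dups)
      d ↔ y ∈ d ∨ (y ∈ l' ∧ PySem.List.count l y > 1) := by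
  intro l'
  induction l' with
  | nil => intro d y; simp
  | cons x rest ih =>
    intro d y
    rw [List.foldl_cons, ih]
    by_cases hdx : x ∈ d <;> by_cases hcx : PySem.List.count l x > 1 <;>
      by_cases hyx : y = x <;>
      rw [PySem.List.count_eq] at hcx <;>
      simp [PySem.List.count_eq, hdx, hcx, hyx]

theorem get_non_unique_els_eq_filter (l : List Int) :
    get_non_unique_els l = l.filter (fun i => decide (PySem.List.count l i > 1)) := by
  unfold get_non_unique_els
  simpa using aLoop_eq_filter l l [] (by intro x hx; simp at hx)

theorem get_non_unique_els_alt_eq_filter (l : List Int) :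
    get_non_unique_els_alt l = l.filter (fun i => decide (PySem.List.count l i > 1)) := by
  unfold get_non_unique_els_alt
  refine List.filter_congr ?_
  intro x hx
  rw [Bool.eq_iff_iff]
  simp only [List.contains_iff_mem, bDups_mem l l [] x, decide_eq_true_eq]
  simp [hx]

-- ===== VERDICT (by name: the statement is the Claim_ definition above) =====
theorem get_non_unique_els_spec : Claim_equal_get_non_unique_els := by
  intro l _
  unfold Spec_get_non_unique_els
  rw [get_non_unique_els_eq_filter, get_non_unique_els_alt_eq_filter]
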